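-- pv_equiv track=rewrite | github.com/teegre/sunsetmusicstore | utils.py | str_to_code
-- ===== SOURCE A (Python) =====
-- def str_to_code(word, max_length=9):
--   """ ABC -> 234 """
--
--   def addth(num: int) -> int:
--     """ 111 => 3 """
--     if num < 10:
--       return num
--     return addth( (num // 10) + (num % 10) )
--
--   num = 0
--   word = word.replace(' ', '')
--
--   for char in word:
--     if max_length == 0:
--       return num
--     num += addth(ord(char)) * pow(10, max_length-1)
--     max_length -= 1
--
--   return num
-- ===== SOURCE B (Python) =====
-- def str_to_code(word, max_length=9):
--   """ ABC -> 234 """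
--   cleaned = word.replace(' ', '')
--   chars = cleaned[:max(max_length, 0)]
--   if not chars:
--     return 0
--   value = 0
--   for c in chars:
--     value = value * 10 + (ord(c) - 1) % 9 + 1
--   return value * 10 ** (max_length - len(chars))
-- ===== Notes on version B (the rewrite author's own statement) =====
-- stated objective: simpler
-- what changed: Replaces the recursive repeated digit-sum with the closed-form digital root (ord(c)-1)%9+1 and the per-position pow(10,ml-1) countdown accumulation with a slice, a single Horner fold and one final power-of-ten shift.
-- outside the precondition, e.g. on str_to_code('A', -2): A returns 0.002, B returns 0
import Mathlib
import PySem

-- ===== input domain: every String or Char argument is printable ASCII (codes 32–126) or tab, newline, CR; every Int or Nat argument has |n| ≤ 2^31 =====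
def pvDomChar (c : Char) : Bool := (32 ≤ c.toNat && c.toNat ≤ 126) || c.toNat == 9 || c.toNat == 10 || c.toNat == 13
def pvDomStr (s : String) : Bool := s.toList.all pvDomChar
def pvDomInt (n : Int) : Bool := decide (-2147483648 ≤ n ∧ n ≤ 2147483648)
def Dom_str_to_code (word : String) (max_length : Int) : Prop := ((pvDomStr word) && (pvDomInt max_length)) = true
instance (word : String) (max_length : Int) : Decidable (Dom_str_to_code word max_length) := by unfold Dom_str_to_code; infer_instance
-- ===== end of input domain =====

-- B replaces A's recursive digit-sum and per-position pow countdown with the closed-form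
-- digital root, a Horner fold over a slice, and one final power-of-ten shift (objective: simpler).

-- ===== PORT A =====
-- termination fact for addth, cited by the port's decreasing_by
theorem pvAddth_dec (num : Int) (h : ¬ num < 10) :
    (PySem.Int.floordiv num 10 + PySem.Int.mod num 10).toNat < num.toNat := by
  rw [PySem.Int.floordiv_eq_ediv_of_pos (by omega), PySem.Int.mod_eq_emod_of_pos (by omega)]
  omega

def pvAddth (num : Int) : Int :=
  if num < 10 then num
  else pvAddth (PySem.Int.floordiv num 10 + PySem.Int.mod num 10)
termination_by num.toNat
decreasing_by exact pvAddth_dec num (by assumption)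

-- the for-loop of A: state (num, max_length), early return when max_length hits 0.
-- 'pow(10, max_length-1)': inside Pre_ (0 ≤ max_length) the exponent here is max_length-1 ≥ 0,
-- where (max_length-1).toNat is exact; a negative exponent makes Python A return a float (excluded by Pre_).
def pvLoopA : List Char → Int → Int → Int
  | [], num, _ => num
  | c :: rest, num, ml =>
    if ml = 0 then num
    else pvLoopA rest (num + pvAddth ((c.toNat : Int)) * 10 ^ (ml - 1).toNat) (ml - 1)

def str_to_code (word : String) (max_length : Int) : Int :=
  pvLoopA (PySem.Str.replace word " " "").toList 0 max_length

-- ===== PORT B =====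
def pvDigit (c : Char) : Int := PySem.Int.mod ((c.toNat : Int) - 1) 9 + 1

def str_to_code_alt (word : String) (max_length : Int) : Int :=
  let cleaned := (PySem.Str.replace word " " "").toList
  let chars := cleaned.take (max max_length 0).toNat      -- cleaned[:max(max_length, 0)]
  if chars.isEmpty then 0
  else (chars.foldl (fun a c => a * 10 + pvDigit c) 0) * 10 ^ (max_length - chars.length).toNat

-- ===== PRECONDITION & SPEC =====
-- Pre_ excludes negative max_length with a nonempty space-stripped word: there A's pow(10, max_length-1)
-- yields a float, so A's result is not an Int.
def Pre_str_to_code (word : String) (max_length : Int) : Prop :=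
  0 ≤ max_length ∨ (PySem.Str.replace word " " "").toList = []
instance (word : String) (max_length : Int) : Decidable (Pre_str_to_code word max_length) := by
  unfold Pre_str_to_code; infer_instance

def pvWitness_str_to_code : String × Int := ("AB C", 9)

def Spec_str_to_code (word : String) (max_length : Int) (out : Int) : Prop := out = str_to_code_alt word max_length
instance (word : String) (max_length : Int) (out : Int) : Decidable (Spec_str_to_code word max_length out) := by unfold Spec_str_to_code; infer_instance

-- ===== CLAIM (what is proved, stated in full; the proofs are below) =====
def Claim_equal_str_to_code : Prop := ∀ (word : String) (max_length : Int), Dom_str_to_code word max_length → Pre_str_to_code word max_length → Spec_str_to_code word max_length (str_to_code word max_length)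

-- ===== LEMMAS AND PROOFS =====

-- replace(' ', '') is the space-filter
theorem replace_go_space (fuel : Nat) :
    ∀ (l acc : List Char), l.length ≤ fuel →
      PySem.Chars.replace.go [' '] [] fuel l acc = acc.reverse ++ l.filter (fun c => !(c == ' ')) := by
  induction fuel with
  | zero =>
    intro l acc h
    have : l = [] := by cases l <;> simp_all
    subst this; simp [PySem.Chars.replace.go]
  | succ n ih =>
    intro l acc h
    cases l with
    | nil => simp [PySem.Chars.replace.go]
    | cons c t =>
      by_cases hc : c = ' '
      · subst hc
        simp only [PySem.Chars.replace.go, List.isPrefixOf, List.filter]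
        simp [ih t acc (by simpa using Nat.le_of_succ_le_succ h)]
      · have hpre : List.isPrefixOf [' '] (c :: t) = false := by
          simp [List.isPrefixOf]; intro h'; exact hc h'.symm
        simp only [PySem.Chars.replace.go, hpre, Bool.false_eq_true, if_false]
        rw [ih t (c :: acc) (by simpa using Nat.le_of_succ_le_succ h)]
        have hb : (c == ' ') = false := by simpa using hc
        simp [List.filter, hb]

theorem replace_space (s : List Char) :
    PySem.Chars.replace s [' '] [] = s.filter (fun c => !(c == ' ')) := by
  rw [PySem.Chars.replace]
  simp only [List.isEmpty_cons, Bool.false_eq_true, if_false]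
  simpa using replace_go_space s.length s [] le_rfl

theorem cleaned_toList (word : String) :
    (PySem.Str.replace word " " "").toList = word.toList.filter (fun c => !(c == ' ')) := by
  rw [PySem.Str.toList_replace]
  simpa using replace_space word.toList

-- addth is the digital root
theorem pvAddth_eq_digit (num : Int) (h1 : 1 ≤ num) :
    pvAddth num = PySem.Int.mod (num - 1) 9 + 1 := by
  rw [PySem.Int.mod_eq_emod_of_pos (by omega)]
  induction hn : num.toNat using Nat.strong_induction_on generalizing num with
  | _ n ih =>
    rw [pvAddth]
    by_cases hlt : num < 10
    · simp only [hlt, if_true]; omega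
    · simp only [hlt, if_false]
      have hq := PySem.Int.floordiv_eq_ediv_of_pos (a := num) (b := 10) (by omega)
      have hr := PySem.Int.mod_eq_emod_of_pos (a := num) (b := 10) (by omega)
      rw [hq, hr]
      have h10 : num / 10 * 10 + num % 10 = num := by omega
      have hge : 1 ≤ num / 10 + num % 10 := by omega
      have hsm : (num / 10 + num % 10).toNat < n := by omega
      rw [ih _ hsm _ hge rfl]
      omega

-- Horner shift: folding from a instead of 0 prepends a * 10^len
theorem horner_shift (l : List Char) :
    ∀ a : Int, l.foldl (fun a c => a * 10 + pvDigit c) a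
      = a * 10 ^ l.length + l.foldl (fun a c => a * 10 + pvDigit c) 0 := by
  induction l with
  | nil => intro a; simp
  | cons c t ih =>
    intro a
    simp only [List.foldl_cons, List.length_cons]
    rw [ih (a * 10 + pvDigit c), ih (0 * 10 + pvDigit c)]
    ring

-- the loop of A computes the Horner value of the taken prefix, shifted
theorem loopA_eq (cs : List Char) :
    ∀ (num ml : Int), 0 ≤ ml → (∀ c ∈ cs, 1 ≤ ((c.toNat : Int))) →
      pvLoopA cs num ml
        = num + (cs.take ml.toNat).foldl (fun a c => a * 10 + pvDigit c) 0
                  * 10 ^ (ml - (cs.take ml.toNat).length).toNat := by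
  induction cs with
  | nil => intro num ml _ _; simp [pvLoopA]
  | cons c rest ih =>
    intro num ml hml hcs
    by_cases h0 : ml = 0
    · subst h0; simp [pvLoopA]
    · have hml1 : 0 ≤ ml - 1 := by omega
      have htake : ml.toNat = (ml - 1).toNat + 1 := by omega
      simp only [pvLoopA, h0, if_false]
      rw [ih _ _ hml1 (fun x hx => hcs x (List.mem_cons_of_mem _ hx))]
      rw [pvAddth_eq_digit _ (hcs c List.mem_cons_self)]
      rw [htake]
      simp only [List.take_succ_cons, List.foldl_cons, List.length_cons]
      rw [horner_shift (rest.take (ml - 1).toNat) (0 * 10 + pvDigit c)]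
      have hk : (rest.take (ml - 1).toNat).length ≤ (ml - 1).toNat := List.length_take_le _ _
      set k := (rest.take (ml - 1).toNat).length with hkdef
      push_cast
      rw [show (ml - ((k : Int) + 1)).toNat = (ml - 1 - (k : Int)).toNat from by omega,
          show (ml - 1).toNat = (ml - 1 - (k : Int)).toNat + k from by omega,
          pow_add]
      have hd : PySem.Int.mod ((c.toNat : Int) - 1) 9 + 1 = pvDigit c := rfl
      rw [hd]
      ring

-- ===== VERDICT (by name: the statement is the Claim_ definition above) =====
theorem str_to_code_spec : Claim_equal_str_to_code := by
  intro word ml hdom hpre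
  unfold Spec_str_to_code str_to_code str_to_code_alt
  rcases hpre with hml | hempty
  · have hchars : ∀ c ∈ (PySem.Str.replace word " " "").toList, 1 ≤ ((c.toNat : Int)) := by
      intro c hc
      rw [cleaned_toList] at hc
      have hcw : c ∈ word.toList := (List.mem_filter.mp hc).1
      have hall : word.toList.all pvDomChar = true := by
        have := (Bool.and_eq_true _ _).mp hdom
        exact this.1
      have := List.all_eq_true.mp hall c hcw
      simp only [pvDomChar, Bool.or_eq_true, Bool.and_eq_true, decide_eq_true_eq, beq_iff_eq] at this
      omega
    generalize hgen : (PySem.Str.replace word " " "").toList = cs at hchars ⊢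
    rw [loopA_eq _ 0 ml hml hchars]
    have hmax : max ml 0 = ml := by omega
    rw [hmax]
    by_cases he : (cs.take ml.toNat) = []
    · rw [he]; simp
      intro _ _
      rw [he]
      simp
    · rw [if_neg (by simpa [List.isEmpty_iff] using he)]
      exact zero_add _
  · rw [hempty]
    simp [pvLoopA]
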